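-- pv_equiv track=rewrite | github.com/gustin-michael/MightyMoAA | calculator/battle_simulation.py | evaluate_ipc
-- ===== SOURCE A (Python) =====
-- def evaluate_ipc(hand):
--   ipc_value = 0
--   for unit_type in hand.keys():
--     match unit_type:
--       case "infantry":
--         ipc_value += hand["infantry"] * 3
--       case "artillery":
--         ipc_value += hand["artillery"] * 4
--       case "tank":
--         ipc_value += hand["tank"] * 6
--       case "fighter":
--         ipc_value += hand["fighter"] * 10
--       case "bomber":
--         ipc_value += hand["bomber"] * 12
--   return ipc_value
-- ===== SOURCE B (Python) =====
-- WEIGHTS = {"infantry": 3, "artillery": 4, "tank": 6, "fighter": 10, "bomber": 12}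
--
-- def evaluate_ipc(hand):
--   return sum(hand.get(unit, 0) * w for unit, w in WEIGHTS.items())
-- ===== Notes on version B (the rewrite author's own statement) =====
-- stated objective: simpler
-- what changed: B iterates over a fixed weights table and looks each count up in hand (absent = 0), replacing A's loop over hand.keys() with a five-way match dispatch.
import Mathlib
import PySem

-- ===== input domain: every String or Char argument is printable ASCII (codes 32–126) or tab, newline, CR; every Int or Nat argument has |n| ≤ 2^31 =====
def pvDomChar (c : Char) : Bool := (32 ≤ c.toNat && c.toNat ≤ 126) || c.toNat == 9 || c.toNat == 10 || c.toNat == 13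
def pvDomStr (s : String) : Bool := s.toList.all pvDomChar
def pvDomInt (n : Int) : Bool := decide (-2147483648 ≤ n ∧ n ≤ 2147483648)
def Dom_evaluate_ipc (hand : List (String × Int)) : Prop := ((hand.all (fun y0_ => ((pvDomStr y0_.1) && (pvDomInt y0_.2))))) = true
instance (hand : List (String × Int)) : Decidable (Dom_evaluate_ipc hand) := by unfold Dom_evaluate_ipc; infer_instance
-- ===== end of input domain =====

-- B sums over a fixed weights table, looking counts up in hand (absent = 0), instead of
-- A's loop over hand's keys with a five-way match; objective: simpler.

-- ===== PORT A =====
-- hand["infantry"] etc. is ported as getD _ 0: the key is drawn from the dict's own keys,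
-- so the lookup is always present and never raises.
def evaluate_ipc (hand : List (String × Int)) : Int :=
  let d := PySem.Dict.ofList hand
  d.keys.foldl (fun ipc_value unit_type =>
    if unit_type == "infantry" then ipc_value + d.getD "infantry" 0 * 3
    else if unit_type == "artillery" then ipc_value + d.getD "artillery" 0 * 4
    else if unit_type == "tank" then ipc_value + d.getD "tank" 0 * 6
    else if unit_type == "fighter" then ipc_value + d.getD "fighter" 0 * 10
    else if unit_type == "bomber" then ipc_value + d.getD "bomber" 0 * 12
    else ipc_value) 0

-- ===== PORT B =====
def pvWeights : List (String × Int) :=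
  [("infantry", 3), ("artillery", 4), ("tank", 6), ("fighter", 10), ("bomber", 12)]

def evaluate_ipc_alt (hand : List (String × Int)) : Int :=
  let d := PySem.Dict.ofList hand
  (pvWeights.map (fun p => d.getD p.1 0 * p.2)).sum

-- ===== PRECONDITION & SPEC =====
def Spec_evaluate_ipc (hand : List (String × Int)) (out : Int) : Prop := out = evaluate_ipc_alt hand
instance (hand : List (String × Int)) (out : Int) : Decidable (Spec_evaluate_ipc hand out) := by unfold Spec_evaluate_ipc; infer_instance

-- ===== CLAIM (what is proved, stated in full; the proofs are below) =====
def Claim_equal_evaluate_ipc : Prop := ∀ (hand : List (String × Int)), Dom_evaluate_ipc hand → Spec_evaluate_ipc hand (evaluate_ipc hand)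

-- ===== LEMMAS AND PROOFS =====

-- per-key contribution of A's loop body
def pvStep (d : PySem.Dict String Int) (k : String) : Int :=
  if k == "infantry" then d.getD "infantry" 0 * 3
  else if k == "artillery" then d.getD "artillery" 0 * 4
  else if k == "tank" then d.getD "tank" 0 * 6
  else if k == "fighter" then d.getD "fighter" 0 * 10
  else if k == "bomber" then d.getD "bomber" 0 * 12
  else 0

theorem pvSum_map_step (d : PySem.Dict String Int) (l : List String) :
    (l.map (pvStep d)).sum =
      (l.count "infantry" : Int) * (d.getD "infantry" 0 * 3)
      + (l.count "artillery" : Int) * (d.getD "artillery" 0 * 4)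
      + (l.count "tank" : Int) * (d.getD "tank" 0 * 6)
      + (l.count "fighter" : Int) * (d.getD "fighter" 0 * 10)
      + (l.count "bomber" : Int) * (d.getD "bomber" 0 * 12) := by
  induction l with
  | nil => simp
  | cons k l ih =>
    simp only [List.map_cons, List.sum_cons, ih, List.count_cons, pvStep, beq_iff_eq]
    split_ifs <;> first | (push_cast; ring1) | (exfalso; subst_vars; simp_all)

theorem pvCount_mul (d : PySem.Dict String Int) (u : String) (w : Int)
    (hnd : d.keys.Nodup) : (d.keys.count u : Int) * (d.getD u 0 * w) = d.getD u 0 * w := by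
  by_cases hu : u ∈ d.keys
  · rw [List.count_eq_one_of_mem hnd hu]; ring
  · have hc : d.contains u = false := by
      by_contra h
      exact hu ((PySem.Dict.contains_iff_mem_keys d u).1 (by simpa using h))
    rw [List.count_eq_zero_of_not_mem hu, PySem.Dict.getD_of_not_contains d 0 hc]
    ring

-- ===== VERDICT (by name: the statement is the Claim_ definition above) =====
theorem evaluate_ipc_spec : Claim_equal_evaluate_ipc := by
  intro hand _
  unfold Spec_evaluate_ipc evaluate_ipc evaluate_ipc_alt
  set d := PySem.Dict.ofList hand with hd
  have hnd : d.keys.Nodup := PySem.Dict.nodup_keys_ofList hand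
  have hfold : d.keys.foldl (fun ipc_value unit_type =>
      if unit_type == "infantry" then ipc_value + d.getD "infantry" 0 * 3
      else if unit_type == "artillery" then ipc_value + d.getD "artillery" 0 * 4
      else if unit_type == "tank" then ipc_value + d.getD "tank" 0 * 6
      else if unit_type == "fighter" then ipc_value + d.getD "fighter" 0 * 10
      else if unit_type == "bomber" then ipc_value + d.getD "bomber" 0 * 12
      else ipc_value) 0
      = d.keys.foldl (fun acc k => acc + pvStep d k) 0 := by
    apply List.foldl_ext
    intro acc k _
    simp only [pvStep]
    split_ifs <;> ring
  rw [hfold, PySem.List.foldl_add, pvSum_map_step, pvCount_mul d _ _ hnd,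
      pvCount_mul d _ _ hnd, pvCount_mul d _ _ hnd, pvCount_mul d _ _ hnd,
      pvCount_mul d _ _ hnd]
  simp [pvWeights]
  ring
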